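-- pv_equiv track=rewrite | github.com/hwatheod/archimedean-tilings | test.py | get_normalization_map
-- ===== SOURCE A (Python) =====
-- def get_normalization_map(fc):
--     """
--
--     :param fc: a parametrized face code as a list of pairs (number_of_sides, parameter)
--     :return: a dictionary from the parameter in the face code to normalized parameters which are
--        strings of the form [0], [1], ..., where [0] is the first distinct parameter in the original
--        face code, [1] is the second distinct parameter, etc.
--
--     For example:
--       [(3,1), (3,1), (4,0)]
--     returns the dictionary
--       1 -> '[0]'
--       2 -> '[1]'
--
--     We use '[0]' and not just an integer 0, so that when the map is applied to orbifolds, we don't collide with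
--     fixed integers in the orbifold.
--     """
--     normalization_map = {}
--     next_index = 0
--     for (a, b) in fc:
--         if b not in normalization_map:
--             normalization_map[b] = '[%s]' % next_index
--             next_index += 1
--     return normalization_map
-- ===== SOURCE B (Python) =====
-- def get_normalization_map(fc):
--     vals = [b for (_, b) in fc]
--     firsts = sorted({(vals.index(b), b) for b in vals}, key=lambda p: p[0])
--     return {b: '[%s]' % j for j, (_, b) in enumerate(firsts)}
-- ===== Notes on version B (the rewrite author's own statement) =====
-- stated objective: alternative
-- what changed: Instead of one accumulating pass with a membership check and a manual counter, B builds the set of (first-index, parameter) pairs via list.index, sorts it by first index, and enumerates the sorted list to assign the '[i]' strings.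
import Mathlib
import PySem

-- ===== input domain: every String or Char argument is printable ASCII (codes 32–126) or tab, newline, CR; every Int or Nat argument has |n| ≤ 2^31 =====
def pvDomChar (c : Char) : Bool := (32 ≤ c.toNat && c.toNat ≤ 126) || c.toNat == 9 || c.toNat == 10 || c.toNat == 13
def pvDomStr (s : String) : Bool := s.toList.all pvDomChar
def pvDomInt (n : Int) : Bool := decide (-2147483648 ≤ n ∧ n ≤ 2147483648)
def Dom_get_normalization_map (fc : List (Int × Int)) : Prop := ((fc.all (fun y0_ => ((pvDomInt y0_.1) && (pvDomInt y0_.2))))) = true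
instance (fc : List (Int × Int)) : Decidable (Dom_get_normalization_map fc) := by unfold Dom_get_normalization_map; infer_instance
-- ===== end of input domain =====

-- B replaces A's single accumulating pass (membership check + manual counter) by an index-based
-- alternative: build the set of (first-index, parameter) pairs, sort by first index, enumerate.

-- ===== PORT A =====
def get_normalization_map (fc : List (Int × Int)) : List (Int × String) :=
  (fc.foldl
    (fun (st : PySem.Dict Int String × Int) p =>
      if st.1.contains p.2 then st
      else (st.1.insert p.2 ("[" ++ PySem.Int.toStr st.2 ++ "]"), st.2 + 1))
    (PySem.Dict.empty, 0)).1.items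

-- ===== PORT B =====
-- 'vals.index(b)' is PySem.List.index?; '.getD 0' is exact here since b is drawn from vals,
-- so the index is always found (Python never raises).
def get_normalization_map_alt (fc : List (Int × Int)) : List (Int × String) :=
  let vals := fc.map (fun p => p.2)
  let firsts := PySem.List.sorted
    (PySem.Set.ofList (vals.map (fun b => ((((PySem.List.index? vals b).getD 0 : Nat) : Int), b))))
    (fun p => p.1) false
  (PySem.List.enumerate firsts).map (fun p => (p.2.2, "[" ++ PySem.Int.toStr p.1 ++ "]"))

-- ===== PRECONDITION & SPEC =====
def Spec_get_normalization_map (fc : List (Int × Int)) (out : List (Int × String)) : Prop := out = get_normalization_map_alt fc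
instance (fc : List (Int × Int)) (out : List (Int × String)) : Decidable (Spec_get_normalization_map fc out) := by unfold Spec_get_normalization_map; infer_instance

-- ===== CLAIM (what is proved, stated in full; the proofs are below) =====
def Claim_equal_get_normalization_map : Prop := ∀ (fc : List (Int × Int)), Dom_get_normalization_map fc → Spec_get_normalization_map fc (get_normalization_map fc)

-- ===== LEMMAS AND PROOFS =====

-- the elements of l not already in `seen`, first occurrences only, in order
def pvFresh (seen : List Int) : List Int → List Int
  | [] => []
  | b :: l => if seen.contains b then pvFresh seen l else b :: pvFresh (seen ++ [b]) l

theorem pvSet_update_eq_append_fresh (l : List Int) :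
    ∀ (seen : List Int), PySem.Set.update seen l = seen ++ pvFresh seen l := by
  induction l with
  | nil => intro seen; simp [PySem.Set.update, pvFresh]
  | cons b l ih =>
    intro seen
    by_cases h : b ∈ seen
    · simpa [PySem.Set.update, PySem.Set.add, pvFresh, h] using ih seen
    · simpa [PySem.Set.update, PySem.Set.add, pvFresh, h] using ih (seen ++ [b])

theorem pvFresh_nil_eq_dedup (l : List Int) : pvFresh [] l = PySem.List.dedup l := by
  have h := pvSet_update_eq_append_fresh l []
  rw [PySem.Set.update_nil_left] at h
  simp only [List.nil_append] at h
  rw [PySem.List.dedup_eq_ofList, h]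

-- A's fold, in items form (same as the direct characterisation of A's loop)
theorem pvFoldA_items (l : List (Int × Int)) :
    ∀ (d : PySem.Dict Int String) (n : Int), d.keys.Nodup → n = (d.size : Int) →
    (l.foldl
      (fun (st : PySem.Dict Int String × Int) p =>
        if st.1.contains p.2 then st
        else (st.1.insert p.2 ("[" ++ PySem.Int.toStr st.2 ++ "]"), st.2 + 1))
      (d, n)).1.items
    = d.items ++ (PySem.List.enumerate (pvFresh d.keys (l.map (fun p => p.2))) n).map
        (fun p => (p.2, "[" ++ PySem.Int.toStr p.1 ++ "]")) := by
  induction l with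
  | nil => intro d n _ _; simp [pvFresh, PySem.List.enumerate_nil]
  | cons ab l ih =>
    intro d n hnd hn
    by_cases hm : ab.2 ∈ d.keys
    · have h : d.contains ab.2 = true := (PySem.Dict.contains_iff_mem_keys d ab.2).mpr hm
      simpa [pvFresh, hm, h] using ih d n hnd hn
    · have h : d.contains ab.2 = false := by
        cases hc : d.contains ab.2
        · rfl
        · exact absurd ((PySem.Dict.contains_iff_mem_keys d ab.2).mp hc) hm
      have hkeys := PySem.Dict.keys_insert_of_not_contains d
        ("[" ++ PySem.Int.toStr n ++ "]") h
      have hitems := PySem.Dict.items_insert_of_not_contains d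
        ("[" ++ PySem.Int.toStr n ++ "]") h
      have hsize := PySem.Dict.size_insert d ab.2 ("[" ++ PySem.Int.toStr n ++ "]")
      rw [h] at hsize
      simp only [Bool.false_eq_true, if_false] at hsize
      have hih := ih (d.insert ab.2 ("[" ++ PySem.Int.toStr n ++ "]")) (n + 1)
        (PySem.Dict.nodup_keys_insert d ab.2 _ hnd)
        (by rw [hsize]; push_cast; omega)
      simp only [List.foldl_cons, h, Bool.false_eq_true, if_false]
      rw [hih, hkeys, hitems]
      simp [pvFresh, hm, PySem.List.enumerate_cons]

-- dedup of a cons: head, then the later distinct elements other than the head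
theorem pvDedup_cons {α : Type} [BEq α] [LawfulBEq α] (x : α) (l : List α) :
    PySem.List.dedup (x :: l) = x :: (PySem.List.dedup l).filter (fun y => y != x) := by
  rw [PySem.List.dedup_eq_ofList, PySem.List.dedup_eq_ofList]
  have h0 : PySem.Set.ofList (x :: l) = PySem.Set.update [x] l := by
    simp [PySem.Set.ofList_eq_foldl, PySem.Set.update, PySem.Set.add, PySem.Set.contains]
  rw [h0, PySem.Set.update_eq_append_filter]
  simp only [List.singleton_append, List.cons.injEq, true_and,
    ← PySem.List.dedup_eq_ofList]
  apply List.filter_congr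
  intro y _
  simp [PySem.Set.contains, bne]

-- set-of-mapped-list under an injective map is the mapped dedup
theorem pvOfList_map_inj {f : Int → Int × Int} (hf : Function.Injective f) (l : List Int) :
    PySem.Set.ofList (l.map f) = (PySem.List.dedup l).map f := by
  induction l with
  | nil => simp
  | cons x l ih =>
    rw [List.map_cons, ← PySem.List.dedup_eq_ofList, pvDedup_cons, pvDedup_cons,
      PySem.List.dedup_eq_ofList, ih, List.map_cons, List.filter_map]
    have hfil : List.filter ((fun y => y != f x) ∘ f) (PySem.List.dedup l)
        = List.filter (fun y => y != x) (PySem.List.dedup l) := by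
      apply List.filter_congr
      intro y _
      have hbeq : (f y == f x) = (y == x) := by
        rcases eq_or_ne y x with h | h
        · subst h; simp
        · have hne : f y ≠ f x := fun hh => h (hf hh)
          rw [beq_eq_false_iff_ne.mpr hne, beq_eq_false_iff_ne.mpr h]
      show (!(f y == f x)) = (!(y == x))
      rw [hbeq]
    rw [hfil]

-- first-occurrence indices are strictly increasing along the dedup order
theorem pvIdx_mono (l : List Int) :
    (PySem.List.dedup l).Pairwise
      (fun a b => ((PySem.List.index? l a).getD 0 : Nat) < ((PySem.List.index? l b).getD 0 : Nat)) := by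
  induction l with
  | nil => simp [PySem.List.dedup_eq_ofList, PySem.Set.ofList_eq_foldl]
  | cons x l ih =>
    rw [pvDedup_cons]
    refine List.pairwise_cons.mpr ⟨?_, ?_⟩
    · intro y hy
      have hyd : y ∈ PySem.List.dedup l := (List.mem_filter.mp hy).1
      have hyx : y ≠ x := by
        have := (List.mem_filter.mp hy).2
        simpa using this
      have hyl : y ∈ l := (PySem.List.mem_dedup l y).mp hyd
      obtain ⟨k, hk⟩ : ∃ k, PySem.List.index? l y = some k := by
        have := (PySem.List.index?_isSome_iff l y).mpr hyl
        exact Option.isSome_iff_exists.mp this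
      rw [PySem.List.index?_cons_self x l, PySem.List.index?_cons_of_ne l (Ne.symm hyx), hk]
      simp
    · refine List.Pairwise.imp_of_mem ?_ (List.Pairwise.filter _ ih)
      intro a b ha hb hab
      have hane : a ≠ x := by simpa using (List.mem_filter.mp ha).2
      have hbne : b ≠ x := by simpa using (List.mem_filter.mp hb).2
      have hal : a ∈ l := (PySem.List.mem_dedup l a).mp (List.mem_filter.mp ha).1
      have hbl : b ∈ l := (PySem.List.mem_dedup l b).mp (List.mem_filter.mp hb).1
      obtain ⟨ka, hka⟩ : ∃ k, PySem.List.index? l a = some k :=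
        Option.isSome_iff_exists.mp ((PySem.List.index?_isSome_iff l a).mpr hal)
      obtain ⟨kb, hkb⟩ : ∃ k, PySem.List.index? l b = some k :=
        Option.isSome_iff_exists.mp ((PySem.List.index?_isSome_iff l b).mpr hbl)
      rw [hka, hkb] at hab
      rw [PySem.List.index?_cons_of_ne l (Ne.symm hane), PySem.List.index?_cons_of_ne l (Ne.symm hbne),
        hka, hkb]
      simpa using hab

theorem pvEnumerate_map {α β : Type} (f : α → β) (l : List α) :
    ∀ (s : Int), PySem.List.enumerate (l.map f) s
      = (PySem.List.enumerate l s).map (fun p => (p.1, f p.2)) := by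
  induction l with
  | nil => intro s; simp [PySem.List.enumerate_nil]
  | cons x l ih => intro s; simp [PySem.List.enumerate_cons, ih]

-- ===== VERDICT (by name: the statement is the Claim_ definition above) =====
theorem get_normalization_map_spec : Claim_equal_get_normalization_map := by
  intro fc _
  unfold Spec_get_normalization_map get_normalization_map get_normalization_map_alt
  dsimp only
  rw [pvFoldA_items fc PySem.Dict.empty 0 (by simp [PySem.Dict.keys_empty]) (by rfl)]
  rw [PySem.Dict.keys_empty, pvFresh_nil_eq_dedup]
  set vals := fc.map (fun p => p.2) with hvals
  set f : Int → Int × Int :=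
    fun b => ((((PySem.List.index? vals b).getD 0 : Nat) : Int), b) with hf
  have hinj : Function.Injective f := by
    intro a b h
    exact congrArg Prod.snd h
  rw [pvOfList_map_inj hinj vals]
  have hsorted : PySem.List.sorted ((PySem.List.dedup vals).map f) (fun p => p.1) false
      = (PySem.List.dedup vals).map f := by
    apply PySem.List.sorted_eq_self_of_pairwise
    rw [List.pairwise_map]
    refine (pvIdx_mono vals).imp ?_
    intro a b h
    simp only [hf]
    exact_mod_cast Nat.le_of_lt h
  rw [hsorted, pvEnumerate_map f (PySem.List.dedup vals) 0]
  simp only [List.map_map]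
  rfl
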